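-- pv_equiv track=rewrite | github.com/bodangren/pixel-art-2026 | scripts/validate_run.py | score_asset
-- ===== SOURCE A (Python) =====
-- from typing import Any
--
-- DEFAULT_WEIGHTS = {
--     "dimensions": 30,
--     "grid_alignment": 25,
--     "transparency": 20,
--     "palette": 15,
--     "color_adherence": 10
-- }
--
-- STYLE_WEIGHTS = {
--     "rpg": {"dimensions": 30, "grid_alignment": 25, "transparency": 20, "palette": 25},
--     "isometric": {"dimensions": 20, "grid_alignment": 30, "transparency": 25, "palette": 25},
--     "scifi": {"dimensions": 25, "grid_alignment": 25, "transparency": 20, "palette": 30},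
--     "ui": {"dimensions": 25, "transparency": 30, "palette": 25, "grid_alignment": 20},
--     "font": {"dimensions": 30, "palette": 40, "transparency": 30}
-- }
--
-- def weighted_score_calculation(criteria: dict[str, bool], style: str = None) -> int:
--     """Calculate weighted score from boolean criteria."""
--     weights = STYLE_WEIGHTS.get(style, DEFAULT_WEIGHTS)
--     score = 100
--     for criterion, passed in criteria.items():
--         if not passed and criterion in weights:
--             score -= weights[criterion]
--     return max(0, score)
--
-- def score_asset(asset_result: dict[str, Any], style: str = None) -> int:
--     """Calculate a score (0-100) for a validated asset."""
--     has_transparency_issue = any("alpha" in issue or "transparency" in issue for issue in asset_result.get("issues", []))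
--     criteria = {
--         "dimensions": not any("dimensions" in issue for issue in asset_result.get("issues", [])),
--         "grid_alignment": not any("grid" in issue for issue in asset_result.get("issues", [])),
--         "transparency": not has_transparency_issue,
--         "palette": not any("palette" in issue for issue in asset_result.get("issues", []))
--     }
--     return weighted_score_calculation(criteria, style)
-- ===== SOURCE B (Python) =====
-- from typing import Any
--
-- DEFAULT_WEIGHTS = {
--     "dimensions": 30,
--     "grid_alignment": 25,
--     "transparency": 20,
--     "palette": 15,
--     "color_adherence": 10
-- }
--
-- STYLE_WEIGHTS = {
--     "rpg": {"dimensions": 30, "grid_alignment": 25, "transparency": 20, "palette": 25},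
--     "isometric": {"dimensions": 20, "grid_alignment": 30, "transparency": 25, "palette": 25},
--     "scifi": {"dimensions": 25, "grid_alignment": 25, "transparency": 20, "palette": 30},
--     "ui": {"dimensions": 25, "transparency": 30, "palette": 25, "grid_alignment": 20},
--     "font": {"dimensions": 30, "palette": 40, "transparency": 30}
-- }
--
-- def score_asset(asset_result: dict[str, Any], style: str = None) -> int:
--     """Calculate a score (0-100) for a validated asset."""
--     dim = grid = trans = pal = False
--     for issue in asset_result.get("issues", []):
--         dim = dim or "dimensions" in issue
--         grid = grid or "grid" in issue
--         trans = trans or "alpha" in issue or "transparency" in issue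
--         pal = pal or "palette" in issue
--     weights = STYLE_WEIGHTS.get(style, DEFAULT_WEIGHTS)
--     penalty = (
--         (weights.get("dimensions", 0) if dim else 0)
--         + (weights.get("grid_alignment", 0) if grid else 0)
--         + (weights.get("transparency", 0) if trans else 0)
--         + (weights.get("palette", 0) if pal else 0)
--     )
--     return max(0, 100 - penalty)
-- ===== Notes on version B (the rewrite author's own statement) =====
-- stated objective: simpler
-- what changed: Four separate any() scans over the issues list plus a generic dict-of-criteria loop in weighted_score_calculation are replaced by one pass over the issues maintaining four boolean flags, followed by a direct arithmetic penalty sum (weights.get(k, 0)) instead of the criteria-dict iteration.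
import Mathlib
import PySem

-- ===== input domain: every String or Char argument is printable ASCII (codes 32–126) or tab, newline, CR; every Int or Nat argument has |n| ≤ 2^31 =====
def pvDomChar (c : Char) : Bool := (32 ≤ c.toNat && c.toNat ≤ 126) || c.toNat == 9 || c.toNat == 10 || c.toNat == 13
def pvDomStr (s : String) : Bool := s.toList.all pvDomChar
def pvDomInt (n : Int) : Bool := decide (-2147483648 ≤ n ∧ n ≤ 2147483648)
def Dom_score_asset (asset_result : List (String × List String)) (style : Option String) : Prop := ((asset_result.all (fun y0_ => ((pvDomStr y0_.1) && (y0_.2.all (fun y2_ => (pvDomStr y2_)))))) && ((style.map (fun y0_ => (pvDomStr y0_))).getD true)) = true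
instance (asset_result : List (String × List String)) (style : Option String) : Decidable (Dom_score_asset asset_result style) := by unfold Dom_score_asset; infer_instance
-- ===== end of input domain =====

-- B replaces A's four separate any() scans and the criteria-dict loop by one pass over the
-- issues with four boolean flags and a direct penalty sum (objective: simpler).
-- ===== PORT A =====
-- assoc-list lookup with default: the type convention's dict (insertion order, first match)
def pvGetD {a : Type} (d : List (String × a)) (k : String) (dflt : a) : a :=
  ((d.find? (fun p => p.1 == k)).map (fun p => p.2)).getD dflt

def pvDefaultWeights : List (String × Int) :=
  [("dimensions", 30), ("grid_alignment", 25), ("transparency", 20), ("palette", 15), ("color_adherence", 10)]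

def pvStyleWeights : List (String × List (String × Int)) :=
  [("rpg", [("dimensions", 30), ("grid_alignment", 25), ("transparency", 20), ("palette", 25)]),
   ("isometric", [("dimensions", 20), ("grid_alignment", 30), ("transparency", 25), ("palette", 25)]),
   ("scifi", [("dimensions", 25), ("grid_alignment", 25), ("transparency", 20), ("palette", 30)]),
   ("ui", [("dimensions", 25), ("transparency", 30), ("palette", 25), ("grid_alignment", 20)]),
   ("font", [("dimensions", 30), ("palette", 40), ("transparency", 30)])]

-- STYLE_WEIGHTS.get(style, DEFAULT_WEIGHTS); style = None never matches a string key
def pvWeightsFor (style : Option String) : List (String × Int) :=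
  match style with
  | some s => pvGetD pvStyleWeights s pvDefaultWeights
  | none => pvDefaultWeights

def weighted_score_calculation (criteria : List (String × Bool)) (style : Option String) : Int :=
  let weights := pvWeightsFor style
  let score := criteria.foldl
    (fun score cp =>
      if !cp.2 && weights.any (fun w => w.1 == cp.1) then score - pvGetD weights cp.1 0 else score)
    100
  max 0 score

def score_asset (asset_result : List (String × List String)) (style : Option String) : Int :=
  let issues := pvGetD asset_result "issues" []
  let has_transparency_issue :=
    issues.any (fun issue => PySem.Str.isIn "alpha" issue || PySem.Str.isIn "transparency" issue)
  let criteria : List (String × Bool) :=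
    [("dimensions", !(issues.any (fun issue => PySem.Str.isIn "dimensions" issue))),
     ("grid_alignment", !(issues.any (fun issue => PySem.Str.isIn "grid" issue))),
     ("transparency", !has_transparency_issue),
     ("palette", !(issues.any (fun issue => PySem.Str.isIn "palette" issue)))]
  weighted_score_calculation criteria style

-- ===== PORT B =====
def score_asset_alt (asset_result : List (String × List String)) (style : Option String) : Int :=
  let issues := pvGetD asset_result "issues" []
  let fl := issues.foldl
    (fun (st : Bool × Bool × Bool × Bool) issue =>
      (st.1 || PySem.Str.isIn "dimensions" issue,
       st.2.1 || PySem.Str.isIn "grid" issue,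
       st.2.2.1 || PySem.Str.isIn "alpha" issue || PySem.Str.isIn "transparency" issue,
       st.2.2.2 || PySem.Str.isIn "palette" issue))
    (false, false, false, false)
  let weights := pvWeightsFor style
  let penalty :=
    (if fl.1 then pvGetD weights "dimensions" 0 else 0)
    + (if fl.2.1 then pvGetD weights "grid_alignment" 0 else 0)
    + (if fl.2.2.1 then pvGetD weights "transparency" 0 else 0)
    + (if fl.2.2.2 then pvGetD weights "palette" 0 else 0)
  max 0 (100 - penalty)

-- ===== PRECONDITION & SPEC =====
def Spec_score_asset (asset_result : List (String × List String)) (style : Option String) (out : Int) : Prop := out = score_asset_alt asset_result style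
instance (asset_result : List (String × List String)) (style : Option String) (out : Int) : Decidable (Spec_score_asset asset_result style out) := by unfold Spec_score_asset; infer_instance

-- ===== CLAIM (what is proved, stated in full; the proofs are below) =====
def Claim_equal_score_asset : Prop := ∀ (asset_result : List (String × List String)) (style : Option String), Dom_score_asset asset_result style → Spec_score_asset asset_result style (score_asset asset_result style)

-- ===== LEMMAS AND PROOFS =====
-- B's single fold computes exactly the four any-scans A performs
theorem pv_flags (l : List String) (a b c d : Bool) :
    l.foldl
      (fun (st : Bool × Bool × Bool × Bool) issue =>
        (st.1 || PySem.Str.isIn "dimensions" issue,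
         st.2.1 || PySem.Str.isIn "grid" issue,
         st.2.2.1 || PySem.Str.isIn "alpha" issue || PySem.Str.isIn "transparency" issue,
         st.2.2.2 || PySem.Str.isIn "palette" issue))
      (a, b, c, d)
    = (a || l.any (fun issue => PySem.Str.isIn "dimensions" issue),
       b || l.any (fun issue => PySem.Str.isIn "grid" issue),
       c || l.any (fun issue => PySem.Str.isIn "alpha" issue || PySem.Str.isIn "transparency" issue),
       d || l.any (fun issue => PySem.Str.isIn "palette" issue)) := by
  induction l generalizing a b c d with
  | nil => simp
  | cons x xs ih =>
    rw [List.foldl_cons, ih]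
    simp [Bool.or_assoc]

-- with the flags fixed, the two score computations agree for every weights table
theorem pv_score_eq (w : List (String × Int)) (b1 b2 b3 b4 : Bool) :
    max 0 (List.foldl
      (fun score (cp : String × Bool) =>
        if !cp.2 && w.any (fun p => p.1 == cp.1) then score - pvGetD w cp.1 0 else score)
      100
      [("dimensions", !b1), ("grid_alignment", !b2), ("transparency", !b3), ("palette", !b4)])
    = max 0 (100 - ((if b1 then pvGetD w "dimensions" 0 else 0)
        + (if b2 then pvGetD w "grid_alignment" 0 else 0)
        + (if b3 then pvGetD w "transparency" 0 else 0)
        + (if b4 then pvGetD w "palette" 0 else 0))) := by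
  have habs : ∀ c : String, w.any (fun p => p.1 == c) = false → pvGetD w c 0 = 0 := by
    intro c h
    simp only [pvGetD]
    rw [List.find?_eq_none.mpr]
    · rfl
    · intro x hx
      have := List.any_eq_false.mp h x hx
      simpa using this
  have step : ∀ (b : Bool) (c : String) (s : Int),
      (if (!(!b) && w.any (fun p => p.1 == c)) = true then s - pvGetD w c 0 else s)
        = s - (if b then pvGetD w c 0 else 0) := by
    intro b c s
    by_cases hm : w.any (fun p => p.1 == c) = true
    · cases b <;> simp [hm]
    · have hf : (w.any (fun p => p.1 == c)) = false := eq_false_of_ne_true hm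
      have h0 := habs c hf
      cases b <;> simp [hf, h0]
  simp only [List.foldl_cons, List.foldl_nil, step]
  congr 1
  ring

-- ===== VERDICT (by name: the statement is the Claim_ definition above) =====
theorem score_asset_spec : Claim_equal_score_asset := by
  intro asset_result style _
  unfold Spec_score_asset score_asset score_asset_alt weighted_score_calculation
  simp only [pv_flags, Bool.false_or]
  exact pv_score_eq (pvWeightsFor style) _ _ _ _
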